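-- pv_equiv track=rewrite | github.com/jasonivey/scripts | proto_buffer.py | find_printable_strs
-- ===== SOURCE A (Python) =====
-- def is_printable(s):
--     return ord(s) >= 0x21 and ord(s) <= 0x7E
--
-- def is_duplicate(s, strs):
--     if s in strs:
--         return True
--     for str1 in strs:
--         if s in str1:
--             return True
--     return False
--
-- def find_printable_strs(buf):
--     strs = []
--     index = 0
--     while index < len(buf):
--         if not is_printable(buf[index]):
--             index += 1
--             continue
--         length = 1
--         while index + length < len(buf) and is_printable(buf[index + length]):
--             length += 1
--         s = buf[index : index + length]
--         if not is_duplicate(s, strs):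
--             strs.append(s)
--         index += 1
--     return strs
-- ===== SOURCE B (Python) =====
-- def is_printable(s):
--     return ord(s) >= 0x21 and ord(s) <= 0x7E
--
-- def find_printable_strs(buf):
--     # Phase 1: one pass collecting the maximal printable runs, skipping each run.
--     runs = []
--     i, n = 0, len(buf)
--     while i < n:
--         if is_printable(buf[i]):
--             j = i + 1
--             while j < n and is_printable(buf[j]):
--                 j += 1
--             runs.append(buf[i:j])
--             i = j
--         else:
--             i += 1
--     # Phase 2: keep a run unless it is a substring of an earlier kept run.
--     kept = []
--     for r in runs:
--         if not any(r in k for k in kept):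
--             kept.append(r)
--     return kept
-- ===== Notes on version B (the rewrite author's own statement) =====
-- stated objective: faster
-- what changed: Instead of restarting a scan at every index and duplicate-testing every suffix of every run against all kept strings, B collects each maximal printable run once (advancing past the whole run) and then applies the substring-containment dedup to the runs only.
import Mathlib
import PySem

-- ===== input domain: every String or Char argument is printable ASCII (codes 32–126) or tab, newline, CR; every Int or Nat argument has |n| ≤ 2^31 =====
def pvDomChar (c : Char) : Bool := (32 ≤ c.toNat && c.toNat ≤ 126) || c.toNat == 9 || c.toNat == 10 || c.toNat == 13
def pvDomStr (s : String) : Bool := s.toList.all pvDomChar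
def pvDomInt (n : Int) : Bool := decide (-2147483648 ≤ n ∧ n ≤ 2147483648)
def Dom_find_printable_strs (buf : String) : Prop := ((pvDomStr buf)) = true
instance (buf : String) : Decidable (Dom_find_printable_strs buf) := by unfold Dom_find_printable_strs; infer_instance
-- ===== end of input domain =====

-- B replaces A's per-index rescan and suffix-by-suffix duplicate testing by one pass over the
-- maximal printable runs (skipping each whole run) followed by the same substring dedup on the
-- runs only; objective: faster.


-- ===== PORT A =====
-- is_printable(s)
def pvPrintable (c : Char) : Bool := decide (0x21 ≤ c.toNat) && decide (c.toNat ≤ 0x7E)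

-- is_duplicate(s, strs): membership test first, then the substring loop (any = first-hit loop)
def pvIsDup (s : List Char) (strs : List (List Char)) : Bool :=
  if strs.contains s then true
  else strs.any (fun t => PySem.Chars.isIn s t)

-- the inner `while` of A: how many further printable chars follow
def pvCountP : List Char → Nat
  | [] => 0
  | c :: cs => if pvPrintable c then pvCountP cs + 1 else 0

-- the outer `while` of A, recursing on the suffix of the buffer (index += 1 each turn)
def pvGoA : List Char → List (List Char) → List (List Char)
  | [], strs => strs
  | c :: cs, strs =>
    if pvPrintable c = false then pvGoA cs strs
    else
      let s := (c :: cs).take (1 + pvCountP cs)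
      pvGoA cs (if pvIsDup s strs then strs else strs ++ [s])

def find_printable_strs (buf : String) : List String :=
  (pvGoA buf.toList []).map (fun l => String.ofList l)

-- ===== PORT B =====
-- phase 1 of Source B: collect the maximal printable runs, skipping each whole run (i = j)
def pvRuns : List Char → List (List Char)
  | [] => []
  | c :: cs =>
    if pvPrintable c then
      (c :: cs.takeWhile pvPrintable) :: pvRuns (cs.dropWhile pvPrintable)
    else pvRuns cs
termination_by l => l.length
decreasing_by
  · simpa using Nat.lt_succ_of_le (List.length_dropWhile_le _ _)
  · simp

-- phase 2 of Source B: keep a run unless it is a substring of an earlier kept run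
def pvStep (kept : List (List Char)) (r : List Char) : List (List Char) :=
  if kept.any (fun k => PySem.Chars.isIn r k) then kept else kept ++ [r]

def find_printable_strs_alt (buf : String) : List String :=
  ((pvRuns buf.toList).foldl pvStep []).map (fun l => String.ofList l)

-- ===== PRECONDITION & SPEC =====
def Spec_find_printable_strs (buf : String) (out : List String) : Prop := out = find_printable_strs_alt buf
instance (buf : String) (out : List String) : Decidable (Spec_find_printable_strs buf out) := by unfold Spec_find_printable_strs; infer_instance

-- ===== CLAIM (what is proved, stated in full; the proofs are below) =====
def Claim_equal_find_printable_strs : Prop := ∀ (buf : String), Dom_find_printable_strs buf → Spec_find_printable_strs buf (find_printable_strs buf)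

-- ===== LEMMAS AND PROOFS =====

-- A's duplicate test is exactly B's substring-of-an-earlier-kept test (equal ⇒ substring)
lemma pvIsDup_eq_any (s : List Char) (strs : List (List Char)) :
    pvIsDup s strs = strs.any (fun t => PySem.Chars.isIn s t) := by
  unfold pvIsDup
  split
  · next h =>
    have hmem : s ∈ strs := by simpa using h
    symm
    rw [List.any_eq_true]
    exact ⟨s, hmem, (PySem.Chars.isIn_iff_infix s s).2 (List.infix_refl s)⟩
  · rfl

-- the inner-while count is the length of the printable prefix
lemma pvCountP_eq (l : List Char) : pvCountP l = (l.takeWhile pvPrintable).length := by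
  induction l with
  | nil => rfl
  | cons c cs ih =>
    by_cases h : pvPrintable c
    · simp [pvCountP, h, List.takeWhile_cons_of_pos, ih]
    · simp [pvCountP, h, List.takeWhile_cons_of_neg]

-- a nonempty suffix of the tail of a run is a substring of anything the run is a substring of
lemma pvSuffix_isIn (s' t k : List Char) (c : Char) (hs : s' <:+ t)
    (hk : PySem.Chars.isIn (c :: t) k = true) : PySem.Chars.isIn s' k = true := by
  refine (PySem.Chars.isIn_iff_infix s' k).2 ?_
  exact ((hs.trans (List.suffix_cons c t)).isInfix).trans ((PySem.Chars.isIn_iff_infix _ _).1 hk)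

-- walking through the inside of a run changes nothing: every suffix is a duplicate
lemma pvGoA_inside (t : List Char) : ∀ (rest : List Char) (strs : List (List Char)),
    (∀ x ∈ t, pvPrintable x = true) →
    (∀ x, rest.head? = some x → pvPrintable x = false) →
    (∀ s', s' ≠ [] → s' <:+ t → ∃ k ∈ strs, PySem.Chars.isIn s' k = true) →
    pvGoA (t ++ rest) strs = pvGoA rest strs := by
  induction t with
  | nil => intro rest strs _ _ _; rfl
  | cons x t' ih =>
    intro rest strs ht hrest hdup
    rw [List.cons_append]
    have hx : pvPrintable x = true := ht x (by simp)
    have htw : (t' ++ rest).takeWhile pvPrintable = t' := by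
      rw [List.takeWhile_append_of_pos (fun a ha => ht a (List.mem_cons_of_mem _ ha))]
      cases rest with
      | nil => simp
      | cons y ys => simp [List.takeWhile_cons_of_neg (by simpa using hrest y rfl)]
    have hrun : (x :: (t' ++ rest)).take (1 + pvCountP (t' ++ rest)) = x :: t' := by
      rw [pvCountP_eq, htw, Nat.add_comm]
      simp
    have hdupT : pvIsDup (x :: t') strs = true := by
      rw [pvIsDup_eq_any, List.any_eq_true]
      exact hdup (x :: t') (by simp) (List.suffix_refl (x :: t'))
    have hstep : pvGoA (x :: (t' ++ rest)) strs = pvGoA (t' ++ rest) strs := by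
      simp only [pvGoA, hx, hrun, hdupT]
      simp
    rw [hstep]
    exact ih rest strs (fun a ha => ht a (List.mem_cons_of_mem _ ha)) hrest
      (fun s' hne hs => hdup s' hne (hs.trans (List.suffix_cons x t')))

-- the main loop of A is B's dedup fold over B's runs
lemma pvGoA_eq_foldl : ∀ (n : Nat) (l : List Char), l.length ≤ n → ∀ strs,
    pvGoA l strs = (pvRuns l).foldl pvStep strs := by
  intro n
  induction n with
  | zero =>
    intro l hl strs
    have : l = [] := List.eq_nil_of_length_eq_zero (Nat.le_zero.mp hl)
    subst this
    simp [pvGoA, pvRuns]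
  | succ n ih =>
    intro l hl strs
    cases l with
    | nil => simp [pvGoA, pvRuns]
    | cons c cs =>
      by_cases hc : pvPrintable c = true
      · have hsplit : cs.takeWhile pvPrintable ++ cs.dropWhile pvPrintable = cs :=
          List.takeWhile_append_dropWhile
        have htake : cs.take (cs.takeWhile pvPrintable).length = cs.takeWhile pvPrintable :=
          (List.prefix_iff_eq_take.mp (List.takeWhile_prefix pvPrintable)).symm
        have hrun : (c :: cs).take (1 + pvCountP cs) = c :: cs.takeWhile pvPrintable := by
          rw [pvCountP_eq, Nat.add_comm]
          simp [htake]
        -- strs after the run-start step, in B's form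
        have hstep : (if pvIsDup (c :: cs.takeWhile pvPrintable) strs then strs
              else strs ++ [c :: cs.takeWhile pvPrintable])
            = pvStep strs (c :: cs.takeWhile pvPrintable) := by
          rw [pvIsDup_eq_any]; rfl
        have hfirst : pvGoA (c :: cs) strs
            = pvGoA cs (pvStep strs (c :: cs.takeWhile pvPrintable)) := by
          simp only [pvGoA, hc, hrun, hstep]
          simp
        -- every nonempty suffix of the run tail is a substring of something kept afterwards
        have hdup : ∀ s', s' ≠ [] → s' <:+ cs.takeWhile pvPrintable →
            ∃ k ∈ pvStep strs (c :: cs.takeWhile pvPrintable), PySem.Chars.isIn s' k = true := by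
          intro s' _ hs
          unfold pvStep
          split
          · next h =>
            obtain ⟨k, hk, hin⟩ := List.any_eq_true.mp h
            exact ⟨k, hk, pvSuffix_isIn s' _ k c hs hin⟩
          · refine ⟨c :: cs.takeWhile pvPrintable, by simp, ?_⟩
            exact (PySem.Chars.isIn_iff_infix _ _).2 ((hs.trans (List.suffix_cons _ _)).isInfix)
        have hinside : pvGoA cs (pvStep strs (c :: cs.takeWhile pvPrintable))
            = pvGoA (cs.dropWhile pvPrintable) (pvStep strs (c :: cs.takeWhile pvPrintable)) := by
          have h := pvGoA_inside (cs.takeWhile pvPrintable) (cs.dropWhile pvPrintable)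
            (pvStep strs (c :: cs.takeWhile pvPrintable)) (fun a ha => List.mem_takeWhile_imp ha)
            (fun x hx => by
              have h2 := List.head?_dropWhile_not pvPrintable cs
              rw [hx] at h2
              simpa using h2)
            hdup
          rwa [hsplit] at h
        have hlen : (cs.dropWhile pvPrintable).length ≤ n := by
          have h1 := List.length_dropWhile_le pvPrintable cs
          simp at hl
          omega
        rw [hfirst, hinside, ih _ hlen]
        have hruns : pvRuns (c :: cs)
            = (c :: cs.takeWhile pvPrintable) :: pvRuns (cs.dropWhile pvPrintable) := by
          rw [pvRuns]
          simp [hc]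
        rw [hruns, List.foldl_cons]
      · have hgo : pvGoA (c :: cs) strs = pvGoA cs strs := by
          simp [pvGoA, hc]
        have hruns : pvRuns (c :: cs) = pvRuns cs := by
          rw [pvRuns]
          simp [hc]
        rw [hgo, hruns]
        exact ih cs (by simpa using Nat.le_of_succ_le_succ (by simpa using hl)) strs

-- ===== VERDICT (by name: the statement is the Claim_ definition above) =====
theorem find_printable_strs_spec : Claim_equal_find_printable_strs := by
  intro buf _
  unfold Spec_find_printable_strs find_printable_strs find_printable_strs_alt
  rw [pvGoA_eq_foldl buf.toList.length buf.toList le_rfl]
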